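-- pv_equiv track=rewrite | github.com/maittrinh156/2048 | app/interactors/board_interactor.py | swipeDownOrRight
-- ===== SOURCE A (Python) =====
-- def swipeDownOrRight(board):
--     N = len(board)
--
--     for line in board:
--         scan1, scan2, write = N-1, N-2, N-1
--
--         while scan1 > -1 and scan2 > -1:
--             if line[scan1] == 0:
--                 scan1 -= 1
--                 continue
--             if line[scan2] == 0 or scan1 == scan2:
--                 scan2 -= 1
--                 continue
--             if line[scan1] == line[scan2]:
--                 line[scan1], line[scan2], line[write] = 0, 0, line[scan1] * 2
--                 scan1, scan2 = scan2 - 1, scan2 - 2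
--                 write -= 1
--             else:
--                 line[scan1], line[write] = 0, line[scan1]
--                 scan1 -= 1
--                 write -= 1
--         if scan1 > -1:
--             line[scan1], line[write] = 0, line[scan1]
--
--     return board
-- ===== SOURCE B (Python) =====
-- def _merge_rev(rev):
--     # rev holds a row's non-zero values right-to-left; merge the rightmost equal pair first
--     if len(rev) >= 2 and rev[0] == rev[1]:
--         return [rev[0] * 2] + _merge_rev(rev[2:])
--     if rev:
--         return [rev[0]] + _merge_rev(rev[1:])
--     return []
--
-- def swipeDownOrRight(board):
--     n = len(board)
--     for line in board:
--         vals = [line[i] for i in range(n) if line[i] != 0]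
--         merged_rev = _merge_rev(vals[::-1])
--         line[:n] = [0] * (n - len(merged_rev)) + merged_rev[::-1]
--     return board
-- ===== Notes on version B (the rewrite author's own statement) =====
-- stated objective: idiomatic
-- what changed: A juggles three in-place cursors (scan1/scan2/write) over each row; B rebuilds each row functionally: take the row's first len(board) cells, collect the non-zero values, merge equal neighbours rightmost-first by recursion, left-pad with zeros and splice back via line[:n].
import Mathlib
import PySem

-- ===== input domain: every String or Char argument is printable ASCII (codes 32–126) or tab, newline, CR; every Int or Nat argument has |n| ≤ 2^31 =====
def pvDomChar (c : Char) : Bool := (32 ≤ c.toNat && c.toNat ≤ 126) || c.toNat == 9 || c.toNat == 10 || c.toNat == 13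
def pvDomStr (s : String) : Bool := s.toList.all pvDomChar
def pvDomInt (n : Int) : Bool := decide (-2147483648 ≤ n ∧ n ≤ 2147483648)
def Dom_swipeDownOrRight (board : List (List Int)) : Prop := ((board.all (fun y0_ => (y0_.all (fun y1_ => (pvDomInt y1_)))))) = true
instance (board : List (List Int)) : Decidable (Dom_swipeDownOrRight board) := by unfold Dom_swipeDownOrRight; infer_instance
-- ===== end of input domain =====

-- B rebuilds each row functionally (collect non-zeros, merge rightmost-first by recursion, left-pad)
-- instead of A's three in-place cursors; equivalence is about the return value (both Pythons mutate
-- the row lists in place; A element-wise, B via line[:] = ...).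


-- ===== PORT A =====
-- A's while loop over one line; state (line, scan1, scan2, write); returns (line, scan1, write)
-- for the fix-up after the loop.  Reads use pyGet? (none = Python IndexError, reachable only on
-- non-square boards, excluded by Pre_); writes use pySetD (indices are ≥ 0 wherever Python writes).
def swipeLoopA (fuel : Nat) (line : List Int) (s1 s2 w : Int) : List Int × Int × Int :=
  match fuel with
  | 0 => (line, s1, w)   -- fuel only guards totality; the callers pass enough for every iteration
  | fuel + 1 =>
    if s1 > -1 ∧ s2 > -1 then
      match PySem.List.pyGet? line s1 with
      | none => (line, s1, w)   -- IndexError in Python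
      | some a =>
        if a = 0 then swipeLoopA fuel line (s1 - 1) s2 w
        else
          match PySem.List.pyGet? line s2 with
          | none => (line, s1, w)   -- IndexError in Python
          | some b =>
            if b = 0 ∨ s1 = s2 then swipeLoopA fuel line s1 (s2 - 1) w
            else if a = b then
              swipeLoopA fuel
                (PySem.List.pySetD (PySem.List.pySetD (PySem.List.pySetD line s1 0) s2 0) w (a * 2))
                (s2 - 1) (s2 - 2) (w - 1)
            else
              swipeLoopA fuel (PySem.List.pySetD (PySem.List.pySetD line s1 0) w a) (s1 - 1) s2 (w - 1)
    else (line, s1, w)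

-- the trailing 'if scan1 > -1: line[scan1], line[write] = 0, line[scan1]'
def swipeFixA : List Int × Int × Int → List Int
  | (line, s1, w) =>
    if s1 > -1 then
      match PySem.List.pyGet? line s1 with
      | none => line   -- IndexError in Python
      | some a => PySem.List.pySetD (PySem.List.pySetD line s1 0) w a
    else line

def swipeDownOrRight (board : List (List Int)) : List (List Int) :=
  let N : Int := board.length
  board.map (fun line => swipeFixA (swipeLoopA (2 * board.length + 1) line (N - 1) (N - 2) (N - 1)))

-- ===== PORT B =====
-- merge a line's non-zero values, given right-to-left; rightmost equal pair merges first
def mergeRev : List Int → List Int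
  | a :: b :: rest => if a = b then a * 2 :: mergeRev rest else a :: mergeRev (b :: rest)
  | [a] => [a]
  | [] => []

def swipeDownOrRight_alt (board : List (List Int)) : List (List Int) :=
  board.map (fun line =>
    let n := board.length
    -- line[i] for i in range(n): exact for i < len(line) (all of Pre_); getD is the total reading
    let vals := ((List.range n).filter (fun i => line.getD i 0 ≠ 0)).map (fun i => line.getD i 0)
    let mergedRev := mergeRev vals.reverse
    (List.replicate (n - mergedRev.length) 0 ++ mergedRev.reverse) ++ line.drop n)

-- ===== PRECONDITION & SPEC =====
-- Pre_ excludes exactly the boards with a row shorter than the row count N = len(board):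
-- Python A raises IndexError there.  Rows may be longer: both programs shift only the first
-- N cells of each row, as A's cursors do.
def Pre_swipeDownOrRight (board : List (List Int)) : Prop :=
  ∀ line ∈ board, board.length ≤ line.length
instance (board : List (List Int)) : Decidable (Pre_swipeDownOrRight board) := by
  unfold Pre_swipeDownOrRight; infer_instance

def pvWitness_swipeDownOrRight : List (List Int) := [[2, 2], [0, 2]]

def Spec_swipeDownOrRight (board : List (List Int)) (out : List (List Int)) : Prop := out = swipeDownOrRight_alt board
instance (board : List (List Int)) (out : List (List Int)) : Decidable (Spec_swipeDownOrRight board out) := by unfold Spec_swipeDownOrRight; infer_instance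

-- ===== CLAIM (what is proved, stated in full; the proofs are below) =====
def Claim_equal_swipeDownOrRight : Prop := ∀ (board : List (List Int)), Dom_swipeDownOrRight board → Pre_swipeDownOrRight board → Spec_swipeDownOrRight board (swipeDownOrRight board)

-- ===== LEMMAS AND PROOFS =====

-- merge of the values left-to-right, rightmost pair first (what B's merged_rev[::-1] computes)
def mergeRight (vals : List Int) : List Int := (mergeRev vals.reverse).reverse

theorem mergeRight_nil : mergeRight [] = [] := rfl
theorem mergeRight_singleton (v : Int) : mergeRight [v] = [v] := rfl
theorem mergeRight_pair (vs : List Int) (v : Int) :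
    mergeRight (vs ++ [v, v]) = mergeRight vs ++ [v * 2] := by
  simp [mergeRight, mergeRev]
theorem mergeRight_ne (vs : List Int) (u v : Int) (h : u ≠ v) :
    mergeRight (vs ++ [u, v]) = mergeRight (vs ++ [u]) ++ [v] := by
  simp [mergeRight, mergeRev, Ne.symm h]
theorem filter_take_zeros (line : List Int) (m n : Nat) (hmn : m ≤ n)
    (hz : ∀ j : Nat, m ≤ j → j < n → line.getD j 0 = 0) :
    (line.take n).filter (fun v => v ≠ 0) = (line.take m).filter (fun v => v ≠ 0) := by
  induction n with
  | zero => simp_all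
  | succ k ih =>
    rcases Nat.eq_or_lt_of_le hmn with h | h
    · subst h; rfl
    · have hk : m ≤ k := by omega
      rw [List.take_add_one, List.filter_append, ih hk (fun j hj1 hj2 => hz j hj1 (by omega))]
      cases hgl : getElem? line k with
      | none => simp
      | some v =>
        have hv : v = 0 := by
          have := hz k hk (by omega)
          simpa [List.getD, hgl] using this
        simp [hv]

theorem take_eq_replicate_of_zeros (line : List Int) (k : Nat) (hk : k ≤ line.length)
    (hz : ∀ j : Nat, j < k → line.getD j 0 = 0) :
    line.take k = List.replicate k 0 := by
  apply List.ext_getElem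
  · simp [hk]
  · intro i h1 h2
    have hi : i < k := by simpa [hk] using h1
    have := hz i hi
    simp [List.getD, List.getElem?_eq_getElem (by omega : i < line.length)] at this
    simpa [this] using this

theorem drop_set_cons (l : List Int) (i : Nat) (v : Int) (h : i < l.length) :
    (l.set i v).drop i = v :: l.drop (i+1) := by
  rw [List.drop_eq_getElem_cons (by simpa using h), List.getElem_set_self (by simpa using h),
    List.drop_set_of_lt (by omega)]

theorem set_two_eq (line : List Int) (s1 w : Nat) (a : Int) (hs1w : s1 ≤ w) (hw : w < line.length)
    (hz : ∀ j : Nat, j < w → j ≠ s1 → line.getD j 0 = 0) :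
    (line.set s1 0).set w a = List.replicate w 0 ++ a :: line.drop (w + 1) := by
  apply List.ext_getElem
  · simp; omega
  · intro i hi1 hi2
    have hlen : i < line.length := by simpa using hi1
    simp only [List.getElem_set]
    by_cases hiw : i = w
    · subst hiw
      rw [List.getElem_append_right (by simp), if_pos rfl]
      simp [List.getElem_cons]
    · have hiw' : i < w ∨ w < i := by omega
      rcases hiw' with hlt | hgt
      · rw [List.getElem_append_left (by simpa using hlt), List.getElem_replicate,
          if_neg (by omega)]
        by_cases hs : s1 = i
        · rw [if_pos hs]
        · rw [if_neg hs]
          have := hz i hlt (fun h => hs h.symm)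
          rwa [List.getD_eq_getElem line 0 (by omega)] at this
      · rw [List.getElem_append_right (by simp; omega), if_neg (by omega), if_neg (by omega)]
        simp only [List.length_replicate, List.getElem_cons, List.getElem_drop]
        rw [dif_neg (by omega)]
        congr 1
        omega

theorem getElem?_eq_some_getD (l : List Int) (n : Nat) (h : n < l.length) :
    getElem? l n = some (l.getD n 0) := by
  rw [List.getElem?_eq_getElem h, List.getD_eq_getElem l 0 h]

theorem pyGet?_eq_some_getD (l : List Int) (i : Int) (h0 : 0 ≤ i) (h1 : i < (l.length : Int)) :
    PySem.List.pyGet? l i = some (l.getD i.toNat 0) := by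
  rw [PySem.List.pyGet?_eq_some_getElem l h0 h1, List.getD_eq_getElem l 0 (by omega)]

theorem getD_set_eq_of_ne (l : List Int) (i j : Nat) (v : Int) (h : i ≠ j) :
    (l.set i v).getD j 0 = l.getD j 0 := by
  simp [List.getD, List.getElem?_set_ne h]

theorem getD_set_self' (l : List Int) (i : Nat) (v : Int) (h : i < l.length) :
    (l.set i v).getD i 0 = v := by
  simp [List.getD, List.getElem?_set_self h]

theorem exitA_spec (line : List Int) (s1 s2 w : Int)
    (hc : ¬(s1 > -1 ∧ s2 > -1))
    (h1 : -1 ≤ s1) (h1w : s1 ≤ w) (hw : w < (line.length : Int)) (h2w : s2 ≤ w)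
    (hZ : ∀ j : Nat, s1 < (j : Int) → (j : Int) ≤ w → line.getD j 0 = 0)
    (hZ' : ∀ j : Nat, s2 < (j : Int) → (j : Int) < s1 → line.getD j 0 = 0) :
    swipeFixA (line, s1, w) =
      List.replicate ((w + 1).toNat - (mergeRight ((line.take (s1 + 1).toNat).filter (fun v => v ≠ 0))).length) 0
        ++ mergeRight ((line.take (s1 + 1).toNat).filter (fun v => v ≠ 0))
        ++ line.drop (w + 1).toNat := by
    by_cases hs1 : s1 > -1
    · have hs2 : ¬ s2 > -1 := fun h => hc ⟨hs1, h⟩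
      have hs1n : s1.toNat < line.length := by omega
      have hget := pyGet?_eq_some_getD line s1 (by omega) (by omega)
      simp only [swipeFixA, if_pos hs1, hget]
      have ps1 : ∀ (xs : List Int) (v : Int), PySem.List.pySetD xs s1 v = xs.set s1.toNat v :=
        fun xs v => PySem.List.pySetD_of_nonneg xs v (by omega)
      have psw : ∀ (xs : List Int) (v : Int), PySem.List.pySetD xs w v = xs.set w.toNat v :=
        fun xs v => PySem.List.pySetD_of_nonneg xs v (by omega)
      simp only [ps1, psw]
      have hX : (line.take s1.toNat).filter (fun v => v ≠ 0) = [] := by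
        rw [filter_take_zeros line 0 s1.toNat (by omega)
            (fun j hj1 hj2 => hZ' j (by omega) (by omega))]
        simp
      have hT : (line.take (s1 + 1).toNat).filter (fun v => v ≠ 0)
          = List.filter (fun v => v ≠ 0) [line.getD s1.toNat 0] := by
        have e1 : (s1 + 1).toNat = s1.toNat + 1 := by omega
        rw [e1, List.take_add_one, List.filter_append, hX, getElem?_eq_some_getD line s1.toNat hs1n]
        simp
      rw [hT]
      have hzlow : ∀ j : Nat, j < w.toNat → j ≠ s1.toNat → line.getD j 0 = 0 := by
        intro j hj hjs
        by_cases hlt : (j : Int) < s1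
        · exact hZ' j (by omega) hlt
        · exact hZ j (by omega) (by omega)
      by_cases ha0 : line.getD s1.toNat 0 = 0
      · rw [ha0]
        have : List.filter (fun v => v ≠ 0) [(0 : Int)] = [] := by simp
        rw [this, mergeRight_nil]
        rw [set_two_eq line s1.toNat w.toNat 0 (by omega) (by omega) hzlow]
        have e5 : (w + 1).toNat = w.toNat + 1 := by omega
        rw [e5]
        simp [List.replicate_succ']
      · have hfs : List.filter (fun v => v ≠ 0) [line.getD s1.toNat 0] = [line.getD s1.toNat 0] := by
          rw [List.filter_singleton, Bool.cond_eq_ite, if_pos (decide_eq_true ha0)]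
        rw [hfs, mergeRight_singleton]
        rw [set_two_eq line s1.toNat w.toNat (line.getD s1.toNat 0) (by omega) (by omega) hzlow]
        simp only [List.length_singleton]
        have e5 : (w + 1).toNat - 1 = w.toNat := by omega
        rw [e5]
        simp
        omega
    · simp only [swipeFixA, if_neg hs1]
      have e0 : (s1 + 1).toNat = 0 := by omega
      rw [e0]
      simp only [List.take_zero, List.filter_nil, mergeRight_nil, List.length_nil, Nat.sub_zero]
      conv_lhs => rw [← List.take_append_drop ((w + 1).toNat) line]
      rw [take_eq_replicate_of_zeros line ((w + 1).toNat) (by omega)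
        (fun j hj => hZ j (by omega) (by omega))]
      simp

theorem loopA_spec : ∀ (fuel : Nat) (line : List Int) (s1 s2 w : Int),
    (s1 + s2 + 4).toNat ≤ fuel →
    -1 ≤ s1 → s1 ≤ w → w < (line.length : Int) → s2 ≤ w →
    (∀ j : Nat, s1 < (j : Int) → (j : Int) ≤ w → line.getD j 0 = 0) →
    (∀ j : Nat, s2 < (j : Int) → (j : Int) < s1 → line.getD j 0 = 0) →
    swipeFixA (swipeLoopA fuel line s1 s2 w) =
      List.replicate ((w + 1).toNat - (mergeRight ((line.take (s1 + 1).toNat).filter (fun v => v ≠ 0))).length) 0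
        ++ mergeRight ((line.take (s1 + 1).toNat).filter (fun v => v ≠ 0))
        ++ line.drop (w + 1).toNat := by
  intro fuel
  induction fuel with
  | zero =>
    intro line s1 s2 w hf h1 h1w hw h2w hZ hZ'
    exact exitA_spec line s1 s2 w (by omega) h1 h1w hw h2w hZ hZ'
  | succ fuel ih =>
    intro line s1 s2 w hf h1 h1w hw h2w hZ hZ'
    by_cases hc : s1 > -1 ∧ s2 > -1
    · cases hget : PySem.List.pyGet? line s1 with
      | none =>
        exfalso
        rw [pyGet?_eq_some_getD line _ (by omega) (by omega)] at hget
        exact (by simp at hget)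
      | some a =>
        by_cases ha : a = 0
        · subst ha
          have hs1n : s1.toNat < line.length := by omega
          have hgeteq := pyGet?_eq_some_getD line s1 (by omega) (by omega)
          have h0 : line.getD s1.toNat 0 = 0 := by
            rw [hgeteq] at hget; exact Option.some.inj hget
          rw [swipeLoopA, if_pos hc, hget]
          simp only []
          have hfe : (line.take (s1+1).toNat).filter (fun v => v ≠ 0)
              = (line.take (s1-1+1).toNat).filter (fun v => v ≠ 0) := by
            have e1 : (s1+1).toNat = s1.toNat + 1 := by omega
            have e2 : (s1-1+1).toNat = s1.toNat := by omega
            rw [e1, e2, List.take_add_one, List.filter_append, getElem?_eq_some_getD line s1.toNat hs1n, h0]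
            simp
          rw [hfe]
          exact ih line (s1 - 1) s2 w (by omega) (by omega) (by omega) hw h2w
            (fun j hj1 hj2 => by
              by_cases hje : (j : Int) = s1
              · have hj' : j = s1.toNat := by omega
                rw [hj']; exact h0
              · exact hZ j (by omega) hj2)
            (fun j hj1 hj2 => hZ' j hj1 (by omega))
        · cases hgetb : PySem.List.pyGet? line s2 with
          | none =>
            exfalso
            rw [pyGet?_eq_some_getD line _ (by omega) (by omega)] at hgetb
            exact (by simp at hgetb)
          | some b =>
            by_cases hb : b = 0 ∨ s1 = s2
            ·
              have hs2n : s2.toNat < line.length := by omega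
              have hgetbeq := pyGet?_eq_some_getD line s2 (by omega) (by omega)
              have hbv : line.getD s2.toNat 0 = b := by
                rw [hgetbeq] at hgetb; exact Option.some.inj hgetb
              rw [swipeLoopA, if_pos hc, hget]
              simp only [if_neg ha, hgetb, if_pos hb]
              exact ih line s1 (s2 - 1) w (by omega) h1 h1w hw (by omega) hZ
                (fun j hj1 hj2 => by
                  by_cases hje : (j : Int) = s2
                  · rcases hb with hb0 | hbe
                    · have hj' : j = s2.toNat := by omega
                      rw [hj', hbv]; exact hb0
                    · omega
                  · exact hZ' j (by omega) hj2)
            · by_cases hab : a = b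
              · subst hab
                have hbne : a ≠ 0 := ha
                have hne : s1 ≠ s2 := fun h => hb (Or.inr h)
                have hs1n : s1.toNat < line.length := by omega
                have hs2n : s2.toNat < line.length := by omega
                have hwn : w.toNat < line.length := by omega
                have hgeteqa := pyGet?_eq_some_getD line s1 (by omega) (by omega)
                have hgeteqb := pyGet?_eq_some_getD line s2 (by omega) (by omega)
                have hav : line.getD s1.toNat 0 = a := by
                  rw [hgeteqa] at hget; exact Option.some.inj hget
                have hbv : line.getD s2.toNat 0 = a := by
                  rw [hgeteqb] at hgetb; exact Option.some.inj hgetb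
                have hs21 : s2 < s1 := by
                  rcases lt_trichotomy s1 s2 with h | h | h
                  · exfalso
                    have := hZ s2.toNat (by omega) (by omega)
                    rw [hbv] at this
                    exact hbne this
                  · exact absurd h hne
                  · exact h
                rw [swipeLoopA, if_pos hc, hget]
                simp only [if_neg ha, hgetb, if_neg hb, if_true]
                have ps1 : ∀ (xs : List Int) (v : Int), PySem.List.pySetD xs s1 v = xs.set s1.toNat v :=
                  fun xs v => PySem.List.pySetD_of_nonneg xs v (by omega)
                have ps2 : ∀ (xs : List Int) (v : Int), PySem.List.pySetD xs s2 v = xs.set s2.toNat v :=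
                  fun xs v => PySem.List.pySetD_of_nonneg xs v (by omega)
                have psw : ∀ (xs : List Int) (v : Int), PySem.List.pySetD xs w v = xs.set w.toNat v :=
                  fun xs v => PySem.List.pySetD_of_nonneg xs v (by omega)
                simp only [ps1, ps2, psw]
                set line' := ((line.set s1.toNat 0).set s2.toNat 0).set w.toNat (a * 2) with hline'
                have hlen' : line'.length = line.length := by simp [hline']
                have ihr := ih line' (s2 - 1) (s2 - 2) (w - 1) (by omega) (by omega) (by omega)
                  (by rw [hlen']; omega) (by omega)
                  (fun j hj1 hj2 => by
                    by_cases hjs2 : j = s2.toNat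
                    · subst hjs2
                      rw [hline', getD_set_eq_of_ne _ _ _ _ (by omega),
                        getD_set_self' _ _ _ (by simpa using hs2n)]
                    · by_cases hjs1 : j = s1.toNat
                      · subst hjs1
                        rw [hline', getD_set_eq_of_ne _ _ _ _ (by omega),
                          getD_set_eq_of_ne _ _ _ _ (by omega), getD_set_self' _ _ _ hs1n]
                      · rw [hline', getD_set_eq_of_ne _ _ _ _ (by omega),
                          getD_set_eq_of_ne _ _ _ _ (by omega), getD_set_eq_of_ne _ _ _ _ (by omega)]
                        by_cases hlt : (j : Int) < s1
                        · exact hZ' j (by omega) hlt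
                        · exact hZ j (by omega) (by omega))
                  (fun j hj1 hj2 => by omega)
                rw [ihr]
                have e1 : (s2 - 1 + 1).toNat = s2.toNat := by omega
                have htake' : line'.take s2.toNat = line.take s2.toNat := by
                  rw [hline', List.take_set_of_le (by omega), List.take_set_of_le (by omega),
                    List.take_set_of_le (by omega)]
                have e3 : (line.take s1.toNat).filter (fun v => v ≠ 0)
                    = (line.take s2.toNat).filter (fun v => v ≠ 0) ++ [a] := by
                  rw [filter_take_zeros line (s2.toNat + 1) s1.toNat (by omega)
                      (fun j hj1 hj2 => hZ' j (by omega) (by omega)),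
                    List.take_add_one, List.filter_append, getElem?_eq_some_getD line s2.toNat hs2n, hbv]
                  simp [hbne]
                have hT : (line.take (s1 + 1).toNat).filter (fun v => v ≠ 0)
                    = (line.take s2.toNat).filter (fun v => v ≠ 0) ++ [a, a] := by
                  have e2 : (s1 + 1).toNat = s1.toNat + 1 := by omega
                  rw [e2, List.take_add_one, List.filter_append, getElem?_eq_some_getD line s1.toNat hs1n, hav, e3]
                  simp [hbne]
                have hM : mergeRight ((line.take (s1 + 1).toNat).filter (fun v => v ≠ 0))
                    = mergeRight ((line.take s2.toNat).filter (fun v => v ≠ 0)) ++ [a * 2] := by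
                  rw [hT]; exact mergeRight_pair _ a
                have hdrop' : line'.drop (w - 1 + 1).toNat = (a * 2) :: line.drop (w + 1).toNat := by
                  have e4 : (w - 1 + 1).toNat = w.toNat := by omega
                  have e5 : (w + 1).toNat = w.toNat + 1 := by omega
                  rw [e4, e5, hline', drop_set_cons _ _ _ (by simpa using hwn),
                    List.drop_set_of_lt (by omega), List.drop_set_of_lt (by omega)]
                rw [hM, hdrop', e1, htake']
                have e6 : (w - 1 + 1).toNat = w.toNat := by omega
                have e7 : (w + 1).toNat = w.toNat + 1 := by omega
                rw [e6, e7]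
                simp [List.append_assoc, Nat.add_sub_add_right]
              ·
                have hbne : b ≠ 0 := fun h => hb (Or.inl h)
                have hne : s1 ≠ s2 := fun h => hb (Or.inr h)
                have hs1n : s1.toNat < line.length := by omega
                have hs2n : s2.toNat < line.length := by omega
                have hwn : w.toNat < line.length := by omega
                have hgeteqa := pyGet?_eq_some_getD line s1 (by omega) (by omega)
                have hgeteqb := pyGet?_eq_some_getD line s2 (by omega) (by omega)
                have hav : line.getD s1.toNat 0 = a := by
                  rw [hgeteqa] at hget; exact Option.some.inj hget
                have hbv : line.getD s2.toNat 0 = b := by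
                  rw [hgeteqb] at hgetb; exact Option.some.inj hgetb
                have hs21 : s2 < s1 := by
                  rcases lt_trichotomy s1 s2 with h | h | h
                  · exfalso
                    have := hZ s2.toNat (by omega) (by omega)
                    rw [hbv] at this
                    exact hbne this
                  · exact absurd h hne
                  · exact h
                rw [swipeLoopA, if_pos hc, hget]
                simp only [if_neg ha, hgetb, if_neg hb, if_neg hab]
                have ps1 : ∀ (xs : List Int) (v : Int), PySem.List.pySetD xs s1 v = xs.set s1.toNat v :=
                  fun xs v => PySem.List.pySetD_of_nonneg xs v (by omega)
                have psw : ∀ (xs : List Int) (v : Int), PySem.List.pySetD xs w v = xs.set w.toNat v :=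
                  fun xs v => PySem.List.pySetD_of_nonneg xs v (by omega)
                simp only [ps1, psw]
                set line' := (line.set s1.toNat 0).set w.toNat a with hline'
                have hlen' : line'.length = line.length := by simp [hline']
                have ihr := ih line' (s1 - 1) s2 (w - 1) (by omega) (by omega) (by omega)
                  (by rw [hlen']; omega) (by omega)
                  (fun j hj1 hj2 => by
                    by_cases hjs1 : j = s1.toNat
                    · subst hjs1
                      rw [hline', getD_set_eq_of_ne _ _ _ _ (by omega), getD_set_self' _ _ _ hs1n]
                    · rw [hline', getD_set_eq_of_ne _ _ _ _ (by omega),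
                        getD_set_eq_of_ne _ _ _ _ (by omega)]
                      exact hZ j (by omega) (by omega))
                  (fun j hj1 hj2 => by
                    rw [hline', getD_set_eq_of_ne _ _ _ _ (by omega), getD_set_eq_of_ne _ _ _ _ (by omega)]
                    exact hZ' j hj1 (by omega))
                rw [ihr]
                have e1 : (s1 - 1 + 1).toNat = s1.toNat := by omega
                have htake' : line'.take s1.toNat = line.take s1.toNat := by
                  rw [hline', List.take_set_of_le (by omega), List.take_set_of_le (by omega)]
                have e3 : (line.take s1.toNat).filter (fun v => v ≠ 0)
                    = (line.take s2.toNat).filter (fun v => v ≠ 0) ++ [b] := by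
                  rw [filter_take_zeros line (s2.toNat + 1) s1.toNat (by omega)
                      (fun j hj1 hj2 => hZ' j (by omega) (by omega)),
                    List.take_add_one, List.filter_append, getElem?_eq_some_getD line s2.toNat hs2n, hbv]
                  simp [hbne]
                have hane : a ≠ 0 := ha
                have hT : (line.take (s1 + 1).toNat).filter (fun v => v ≠ 0)
                    = ((line.take s2.toNat).filter (fun v => v ≠ 0) ++ [b]) ++ [a] := by
                  have e2 : (s1 + 1).toNat = s1.toNat + 1 := by omega
                  rw [e2, List.take_add_one, List.filter_append, getElem?_eq_some_getD line s1.toNat hs1n, hav, e3]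
                  simp [hane]
                have hM : mergeRight ((line.take (s1 + 1).toNat).filter (fun v => v ≠ 0))
                    = mergeRight ((line.take s2.toNat).filter (fun v => v ≠ 0) ++ [b]) ++ [a] := by
                  have : ((line.take s2.toNat).filter (fun v => v ≠ 0) ++ [b]) ++ [a]
                      = (line.take s2.toNat).filter (fun v => v ≠ 0) ++ [b, a] := by simp
                  rw [hT, this, mergeRight_ne _ b a (fun h => hab h.symm)]
                have hdrop' : line'.drop (w - 1 + 1).toNat = a :: line.drop (w + 1).toNat := by
                  have e4 : (w - 1 + 1).toNat = w.toNat := by omega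
                  have e5 : (w + 1).toNat = w.toNat + 1 := by omega
                  rw [e4, e5, hline', drop_set_cons _ _ _ (by simpa using hwn),
                    List.drop_set_of_lt (by omega)]
                rw [hM, hdrop', e1, htake', e3]
                have e6 : (w - 1 + 1).toNat = w.toNat := by omega
                have e7 : (w + 1).toNat = w.toNat + 1 := by omega
                rw [e6, e7]
                simp [List.append_assoc, Nat.add_sub_add_right]
    · rw [swipeLoopA, if_neg hc]
      exact exitA_spec line s1 s2 w hc h1 h1w hw h2w hZ hZ'

theorem vals_eq (line : List Int) (n : Nat) :
    ((List.range n).filter (fun i => line.getD i 0 ≠ 0)).map (fun i => line.getD i 0)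
      = (line.take n).filter (fun v => v ≠ 0) := by
  induction n with
  | zero => simp
  | succ k ih =>
    rw [List.range_succ, List.filter_append, List.map_append, ih]
    by_cases hk : k < line.length
    · rw [List.take_add_one, List.filter_append, getElem?_eq_some_getD line k hk]
      by_cases h0 : line.getD k 0 = 0
      · simp only [List.getD] at h0; simp [h0]
      · simp only [List.getD] at h0; simp [h0]
    · have h1 : (getElem? line k).getD 0 = 0 := by
        rw [List.getElem?_eq_none (by omega)]; rfl
      have h2 : line.take (k + 1) = line.take k := by
        rw [List.take_of_length_le (by omega), List.take_of_length_le (by omega)]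
      simp [h1, h2]

theorem line_spec (line : List Int) (n : Nat) (hN : n ≤ line.length) (hpos : 0 < n) :
    swipeFixA (swipeLoopA (2 * n + 1) line ((n : Int) - 1) ((n : Int) - 2) ((n : Int) - 1)) =
      (List.replicate (n - (mergeRev ((line.take n).filter (fun v => v ≠ 0)).reverse).length) 0
        ++ (mergeRev ((line.take n).filter (fun v => v ≠ 0)).reverse).reverse)
        ++ line.drop n := by
  have h := loopA_spec (2 * n + 1) line ((n : Int) - 1) ((n : Int) - 2) ((n : Int) - 1) (by omega)
    (by omega) (by omega) (by omega) (by omega)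
    (fun j hj1 hj2 => by omega) (fun j hj1 hj2 => by omega)
  rw [h]
  have e1 : ((n : Int) - 1 + 1).toNat = n := by omega
  rw [e1]
  simp [mergeRight, List.append_assoc]

-- ===== VERDICT (by name: the statement is the Claim_ definition above) =====
theorem swipeDownOrRight_spec : Claim_equal_swipeDownOrRight := by
  intro board _ hpre
  unfold Spec_swipeDownOrRight swipeDownOrRight swipeDownOrRight_alt
  apply List.map_congr_left
  intro line hline
  have hlen : board.length ≤ line.length := hpre line hline
  have hpos : 0 < board.length := List.length_pos_of_mem hline
  simp only [vals_eq]
  exact line_spec line board.length hlen hpos
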